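-- pv_equiv track=rewrite | github.com/joyboyAT/TruthLens | tests/test_simple_pipeline.py | get_evidence_sources
-- ===== SOURCE A (Python) =====
-- from typing import List, Dict, Any, Optional
--
-- def get_evidence_sources(claim: str) -> List[str]:
--     """Get relevant evidence sources for a claim."""
--     # Mock evidence sources based on claim content
--     sources = []
--
--     claim_lower = claim.lower()
--
--     if any(word in claim_lower for word in ["covid", "vaccine", "health", "medical"]):
--         sources.extend(["WHO", "CDC", "medical journals", "peer-reviewed studies"])
--
--     if any(word in claim_lower for word in ["5g", "radiation", "technology"]):
--         sources.extend(["FCC", "IEEE", "scientific studies", "regulatory bodies"])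
--
--     if any(word in claim_lower for word in ["earth", "flat", "nasa", "space"]):
--         sources.extend(["NASA", "astronomical observations", "satellite data", "scientific consensus"])
--
--     if any(word in claim_lower for word in ["water", "boil", "temperature", "physics"]):
--         sources.extend(["physics textbooks", "scientific literature", "experimental data"])
--
--     # Default sources
--     if not sources:
--         sources = ["fact-checking websites", "reliable news sources", "expert opinions"]
--
--     return sources
-- ===== SOURCE B (Python) =====
-- # Text-driven multi-pattern scan: walk positions of the lowered claim once, marking
-- # matched keyword groups via a keyword->group map; emit matched groups' sources in order.
-- KEYWORD_GROUP = {
--     "covid": 0, "vaccine": 0, "health": 0, "medical": 0,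
--     "5g": 1, "radiation": 1, "technology": 1,
--     "earth": 2, "flat": 2, "nasa": 2, "space": 2,
--     "water": 3, "boil": 3, "temperature": 3, "physics": 3,
-- }
--
-- GROUP_SOURCES = [
--     ["WHO", "CDC", "medical journals", "peer-reviewed studies"],
--     ["FCC", "IEEE", "scientific studies", "regulatory bodies"],
--     ["NASA", "astronomical observations", "satellite data", "scientific consensus"],
--     ["physics textbooks", "scientific literature", "experimental data"],
-- ]
--
-- DEFAULT_SOURCES = ["fact-checking websites", "reliable news sources", "expert opinions"]
--
-- def get_evidence_sources(claim: str):
--     text = claim.lower()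
--     matched = set()
--     for i in range(len(text)):
--         for kw, g in KEYWORD_GROUP.items():
--             if g not in matched and text.startswith(kw, i):
--                 matched.add(g)
--     sources = [s for g in range(4) if g in matched for s in GROUP_SOURCES[g]]
--     return sources if sources else DEFAULT_SOURCES
-- ===== Notes on version B (the rewrite author's own statement) =====
-- stated objective: alternative
-- what changed: Instead of four keyword-group substring tests, B runs a text-driven naive multi-pattern scan: it walks every position of the lowered claim once, marking the group of any keyword that starts there via a keyword-to-group map, then emits the matched groups' source lists in fixed order (default when none matched).
import Mathlib
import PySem

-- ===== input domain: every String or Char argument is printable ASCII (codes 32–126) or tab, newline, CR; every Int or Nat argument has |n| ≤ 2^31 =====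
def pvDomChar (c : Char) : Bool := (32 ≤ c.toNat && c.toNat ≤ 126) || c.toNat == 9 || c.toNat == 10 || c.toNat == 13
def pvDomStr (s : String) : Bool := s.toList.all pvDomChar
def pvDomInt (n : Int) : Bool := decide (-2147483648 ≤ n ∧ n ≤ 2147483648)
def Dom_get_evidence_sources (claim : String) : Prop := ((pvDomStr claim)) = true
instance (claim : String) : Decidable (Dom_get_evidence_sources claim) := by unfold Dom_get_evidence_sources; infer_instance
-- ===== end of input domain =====

-- B replaces the four keyword-group substring tests by a text-driven multi-pattern scan over the
-- positions of the lowered claim, using a keyword→group map (alternative; same cost).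

-- ===== PORT A =====
def get_evidence_sources (claim : String) : List String :=
  let sources : List String := []
  let claim_lower := PySem.Str.lower claim
  let sources := if (["covid", "vaccine", "health", "medical"]).any
      (fun word => PySem.Str.isIn word claim_lower) then
    sources ++ ["WHO", "CDC", "medical journals", "peer-reviewed studies"] else sources
  let sources := if (["5g", "radiation", "technology"]).any
      (fun word => PySem.Str.isIn word claim_lower) then
    sources ++ ["FCC", "IEEE", "scientific studies", "regulatory bodies"] else sources
  let sources := if (["earth", "flat", "nasa", "space"]).any
      (fun word => PySem.Str.isIn word claim_lower) then
    sources ++ ["NASA", "astronomical observations", "satellite data", "scientific consensus"] else sources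
  let sources := if (["water", "boil", "temperature", "physics"]).any
      (fun word => PySem.Str.isIn word claim_lower) then
    sources ++ ["physics textbooks", "scientific literature", "experimental data"] else sources
  if sources = [] then ["fact-checking websites", "reliable news sources", "expert opinions"]
  else sources

-- ===== PORT B =====
def pvKeywordGroup : List (String × Nat) :=
  [("covid", 0), ("vaccine", 0), ("health", 0), ("medical", 0),
   ("5g", 1), ("radiation", 1), ("technology", 1),
   ("earth", 2), ("flat", 2), ("nasa", 2), ("space", 2),
   ("water", 3), ("boil", 3), ("temperature", 3), ("physics", 3)]

def pvGroupSources : List (List String) :=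
  [["WHO", "CDC", "medical journals", "peer-reviewed studies"],
   ["FCC", "IEEE", "scientific studies", "regulatory bodies"],
   ["NASA", "astronomical observations", "satellite data", "scientific consensus"],
   ["physics textbooks", "scientific literature", "experimental data"]]

def pvDefaultSources : List String :=
  ["fact-checking websites", "reliable news sources", "expert opinions"]

-- the position-driven scan: matched groups, collected as a duplicate-free list (Python set)
def pvScan (text : List Char) : List Nat :=
  (List.range text.length).foldl (fun m i =>
    pvKeywordGroup.foldl (fun m kg =>
      if !(m.contains kg.2) && List.isPrefixOf kg.1.toList (text.drop i) then m ++ [kg.2]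
      else m) m) []

def get_evidence_sources_alt (claim : String) : List String :=
  let text := (PySem.Str.lower claim).toList
  let matched := pvScan text
  let sources := ((List.range 4).filter (fun g => matched.contains g)).flatMap
    (fun g => pvGroupSources.getD g [])
  if sources = [] then pvDefaultSources else sources

-- ===== PRECONDITION & SPEC =====
def Spec_get_evidence_sources (claim : String) (out : List String) : Prop := out = get_evidence_sources_alt claim
instance (claim : String) (out : List String) : Decidable (Spec_get_evidence_sources claim out) := by unfold Spec_get_evidence_sources; infer_instance

-- ===== CLAIM (what is proved, stated in full; the proofs are below) =====
def Claim_equal_get_evidence_sources : Prop := ∀ (claim : String), Dom_get_evidence_sources claim → Spec_get_evidence_sources claim (get_evidence_sources claim)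

-- ===== LEMMAS AND PROOFS =====

-- membership after the inner (per-position) keyword fold
theorem pv_inner_mem (t : List Char) (g : Nat) (ks : List (String × Nat)) :
    ∀ (m : List Nat),
      g ∈ ks.foldl (fun m kg =>
        if !(m.contains kg.2) && List.isPrefixOf kg.1.toList t then m ++ [kg.2] else m) m
      ↔ g ∈ m ∨ ∃ kw, (kw, g) ∈ ks ∧ kw.toList <+: t := by
  induction ks with
  | nil => simp
  | cons kg ks ih =>
    intro m
    simp only [List.foldl_cons]
    split_ifs with hc
    · rw [ih]
      have hc' : kg.2 ∉ m ∧ kg.1.toList <+: t := by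
        simpa [List.contains_iff_mem, List.isPrefixOf_iff_prefix, Bool.and_eq_true] using hc
      constructor
      · rintro (h | ⟨kw, hk, hp⟩)
        · rcases List.mem_append.mp h with h | h
          · exact Or.inl h
          · have hg : g = kg.2 := by simpa using h
            exact Or.inr ⟨kg.1, by simp [hg], hc'.2⟩
        · exact Or.inr ⟨kw, List.mem_cons_of_mem _ hk, hp⟩
      · rintro (h | ⟨kw, hk, hp⟩)
        · exact Or.inl (List.mem_append.mpr (Or.inl h))
        · rcases List.mem_cons.mp hk with heq | hk'
          · have hg : g = kg.2 := congrArg Prod.snd heq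
            exact Or.inl (List.mem_append.mpr (Or.inr (by simp [hg])))
          · exact Or.inr ⟨kw, hk', hp⟩
    · rw [ih]
      constructor
      · rintro (h | ⟨kw, hk, hp⟩)
        · exact Or.inl h
        · exact Or.inr ⟨kw, List.mem_cons_of_mem _ hk, hp⟩
      · rintro (h | ⟨kw, hk, hp⟩)
        · exact Or.inl h
        · rcases List.mem_cons.mp hk with heq | hk'
          · -- head case: the guard failed, so either kg.2 ∈ m already or the prefix fails
            have hkw : kw = kg.1 := congrArg Prod.fst heq
            have hg : g = kg.2 := congrArg Prod.snd heq
            have hb : ¬ (kg.2 ∉ m ∧ kg.1.toList <+: t) := by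
              simpa [List.contains_iff_mem, List.isPrefixOf_iff_prefix, Bool.and_eq_true] using hc
            rcases not_and_or.mp hb with h1 | h2
            · exact Or.inl (hg ▸ not_not.mp h1)
            · exact absurd (hkw ▸ hp) h2
          · exact Or.inr ⟨kw, hk', hp⟩

-- membership after the outer (all-positions) fold
theorem pv_outer_mem (t : List Char) (g : Nat) (is : List Nat) :
    ∀ (m : List Nat),
      g ∈ is.foldl (fun m i =>
        pvKeywordGroup.foldl (fun m kg =>
          if !(m.contains kg.2) && List.isPrefixOf kg.1.toList (t.drop i) then m ++ [kg.2]
          else m) m) m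
      ↔ g ∈ m ∨ ∃ i ∈ is, ∃ kw, (kw, g) ∈ pvKeywordGroup ∧ kw.toList <+: t.drop i := by
  induction is with
  | nil => simp
  | cons i is ih =>
    intro m
    simp only [List.foldl_cons]
    rw [ih, pv_inner_mem]
    constructor
    · rintro ((h | ⟨kw, hk, hp⟩) | ⟨j, hj, kw, hk, hp⟩)
      · exact Or.inl h
      · exact Or.inr ⟨i, by simp, kw, hk, hp⟩
      · exact Or.inr ⟨j, by simp [hj], kw, hk, hp⟩
    · rintro (h | ⟨j, hj, kw, hk, hp⟩)
      · exact Or.inl (Or.inl h)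
      · rcases List.mem_cons.mp hj with rfl | hj'
        · exact Or.inl (Or.inr ⟨kw, hk, hp⟩)
        · exact Or.inr ⟨j, hj', kw, hk, hp⟩

-- all keywords are nonempty
theorem pv_kw_ne_nil : ∀ kg ∈ pvKeywordGroup, kg.1.toList ≠ [] := by decide

-- the scan marks g exactly when some keyword of group g occurs in the text
theorem pv_scan_mem (t : List Char) (g : Nat) :
    g ∈ pvScan t ↔ ∃ kw, (kw, g) ∈ pvKeywordGroup ∧ PySem.Chars.isIn kw.toList t = true := by
  unfold pvScan
  rw [pv_outer_mem]
  simp only [List.mem_range]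
  constructor
  · rintro (h | ⟨i, _, kw, hk, hp⟩)
    · simp at h
    · exact ⟨kw, hk, (PySem.Chars.exists_prefix_drop_iff_isIn _ _).mp ⟨i, hp⟩⟩
  · rintro ⟨kw, hk, hin⟩
    obtain ⟨i, hp⟩ := (PySem.Chars.exists_prefix_drop_iff_isIn _ _).mpr hin
    refine Or.inr ⟨i, ?_, kw, hk, hp⟩
    by_contra hge
    rw [Nat.not_lt] at hge
    have hnil : t.drop i = [] := List.drop_eq_nil_of_le hge
    rw [hnil] at hp
    exact pv_kw_ne_nil (kw, g) hk (List.prefix_nil.mp hp)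

-- group membership in the scan equals A's corresponding any-test
theorem pv_contains_eq (s : String) (g : Nat) (ws : List String)
    (h : ∀ kw, ((kw, g) ∈ pvKeywordGroup ↔ kw ∈ ws)) :
    ((pvScan s.toList).contains g) = ws.any (fun w => PySem.Str.isIn w s) := by
  rw [Bool.eq_iff_iff]
  rw [List.contains_iff_mem, pv_scan_mem, List.any_eq_true]
  constructor
  · rintro ⟨kw, hk, hin⟩
    refine ⟨kw, (h kw).mp hk, ?_⟩
    rwa [PySem.Str.isIn_eq]
  · rintro ⟨kw, hk, hin⟩
    refine ⟨kw, (h kw).mpr hk, ?_⟩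
    rwa [PySem.Str.isIn_eq] at hin

-- ===== VERDICT (by name: the statement is the Claim_ definition above) =====
set_option maxHeartbeats 1000000 in
theorem get_evidence_sources_spec : Claim_equal_get_evidence_sources := by
  intro claim _
  unfold Spec_get_evidence_sources get_evidence_sources get_evidence_sources_alt
  have h0 := pv_contains_eq (PySem.Str.lower claim) 0 ["covid", "vaccine", "health", "medical"]
    (by intro kw; constructor <;> (intro h; simp [pvKeywordGroup] at h ⊢; tauto))
  have h1 := pv_contains_eq (PySem.Str.lower claim) 1 ["5g", "radiation", "technology"]
    (by intro kw; constructor <;> (intro h; simp [pvKeywordGroup] at h ⊢; tauto))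
  have h2 := pv_contains_eq (PySem.Str.lower claim) 2 ["earth", "flat", "nasa", "space"]
    (by intro kw; constructor <;> (intro h; simp [pvKeywordGroup] at h ⊢; tauto))
  have h3 := pv_contains_eq (PySem.Str.lower claim) 3 ["water", "boil", "temperature", "physics"]
    (by intro kw; constructor <;> (intro h; simp [pvKeywordGroup] at h ⊢; tauto))
  simp only [show List.range 4 = [0, 1, 2, 3] from rfl, List.filter_cons, List.filter_nil,
    h0, h1, h2, h3]
  cases hc0 : (["covid", "vaccine", "health", "medical"]).any
      (fun w => PySem.Str.isIn w (PySem.Str.lower claim)) <;>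
  cases hc1 : (["5g", "radiation", "technology"]).any
      (fun w => PySem.Str.isIn w (PySem.Str.lower claim)) <;>
  cases hc2 : (["earth", "flat", "nasa", "space"]).any
      (fun w => PySem.Str.isIn w (PySem.Str.lower claim)) <;>
  cases hc3 : (["water", "boil", "temperature", "physics"]).any
      (fun w => PySem.Str.isIn w (PySem.Str.lower claim)) <;>
  simp [pvGroupSources, pvDefaultSources, List.flatMap]
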